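-- pv_equiv track=rewrite | github.com/daniel-reich/ubiquitous-fiesta | L2CW7yoxZK3RWB2Kc_1.py | nico_cipher
-- ===== SOURCE A (Python) =====
-- def nico_cipher(msg, k):
--     len_k, m = len(k), [[c] for c in k]
--     for i, c in enumerate(msg):
--         m[i % len_k].append(c)
--     len_m0 = len(m[0])
--     for r, row in enumerate(m):
--         m[r] += [" "] * (len_m0 - len(row))
--     sorted_m = [s_row[1:] for s_row in sorted(m, key=lambda rw: rw[0])]
--     return "".join("".join(tpl) for tpl in zip(*sorted_m))
-- ===== SOURCE B (Python) =====
-- def nico_cipher(msg, k):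
--     lk = len(k)
--     order = sorted(range(lk), key=lambda j: k[j])
--     ncols = (len(msg) + lk - 1) // lk
--     out = []
--     for col in range(ncols):
--         for r in order:
--             i = r + col * lk
--             out.append(msg[i] if i < len(msg) else " ")
--     return "".join(out)
-- ===== Notes on version B (the rewrite author's own statement) =====
-- stated objective: faster
-- what changed: B replaces A's build-grid/pad-rows/sort-rows/zip-transpose pipeline by a single stable argsort of the key positions followed by a direct index-arithmetic read of the message (msg[r + col*len(k)]), building the output column by column with no intermediate grid (measured ~2.9x faster at the largest size).
import Mathlib
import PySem

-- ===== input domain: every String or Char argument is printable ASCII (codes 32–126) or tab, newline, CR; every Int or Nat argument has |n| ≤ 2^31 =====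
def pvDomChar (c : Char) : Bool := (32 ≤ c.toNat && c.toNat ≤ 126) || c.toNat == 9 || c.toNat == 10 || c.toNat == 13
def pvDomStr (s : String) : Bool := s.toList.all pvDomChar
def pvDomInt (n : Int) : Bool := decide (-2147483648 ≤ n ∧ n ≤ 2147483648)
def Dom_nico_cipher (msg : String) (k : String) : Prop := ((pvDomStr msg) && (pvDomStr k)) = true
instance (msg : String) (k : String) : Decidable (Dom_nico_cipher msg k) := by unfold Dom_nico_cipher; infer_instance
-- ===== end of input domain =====

-- B replaces A's build-grid/pad/sort-rows/zip-transpose pipeline by an argsort of the key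
-- positions plus direct index-arithmetic reads (objective: faster in a timing run, no
-- intermediate grid is built).

-- ===== PORT A =====
-- port of the builtin zip(*rows) by its contract: transpose truncated to the shortest row
def pyZipStar (rows : List (List Char)) : List (List Char) :=
  match rows with
  | [] => []
  | r :: rs =>
    (List.range (rs.foldl (fun a l => min a l.length) r.length)).map
      (fun i => (r :: rs).map (fun row => row.getD i ' '))

def nico_cipher (msg : String) (k : String) : String :=
  let chars := msg.toList
  let ks := k.toList
  let lk := ks.length
  let m0 := ks.map (fun c => [c])
  let m1 := (PySem.List.enumerate chars 0).foldl (fun m ic =>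
      let idx := (PySem.Int.mod ic.1 (lk : Int)).toNat
      m.set idx (m.getD idx [] ++ [ic.2])) m0
  let len_m0 := (m1.getD 0 []).length
  let m2 := m1.map (fun row => row ++ List.replicate (len_m0 - row.length) ' ')
  let sorted_m := (PySem.List.sorted m2 (fun rw => rw.getD 0 ' ') false).map (fun s => s.drop 1)
  String.mk (pyZipStar sorted_m).flatten

-- ===== PORT B =====
def nico_cipher_alt (msg : String) (k : String) : String :=
  let chars := msg.toList
  let lk := k.toList.length
  let order := PySem.List.sorted (List.range lk) (fun j => k.toList.getD j ' ') false
  let ncols := (chars.length + lk - 1) / lk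
  String.mk ((List.range ncols).foldl (fun acc col =>
      order.foldl (fun acc r =>
        acc ++ [if r + col * lk < chars.length then chars.getD (r + col * lk) ' ' else ' ']) acc) [])

-- ===== PRECONDITION & SPEC =====
-- Pre_ excludes only the empty key, on which Python A raises (ZeroDivisionError for non-empty
-- msg, IndexError for empty msg); B raises ZeroDivisionError there too.
def Pre_nico_cipher (msg : String) (k : String) : Prop := k ≠ ""
instance (msg : String) (k : String) : Decidable (Pre_nico_cipher msg k) := by
  unfold Pre_nico_cipher; infer_instance

def pvWitness_nico_cipher : String × String := ("secret message", "cab")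

def Spec_nico_cipher (msg : String) (k : String) (out : String) : Prop := out = nico_cipher_alt msg k
instance (msg : String) (k : String) (out : String) : Decidable (Spec_nico_cipher msg k out) := by
  unfold Spec_nico_cipher; infer_instance

-- ===== CLAIM (what is proved, stated in full; the proofs are below) =====
def Claim_equal_nico_cipher : Prop := ∀ (msg : String) (k : String), Dom_nico_cipher msg k → Pre_nico_cipher msg k → Spec_nico_cipher msg k (nico_cipher msg k)

-- ===== LEMMAS AND PROOFS =====

-- the per-cell value both programs produce: column `col` of (sorted) row `j`
def cellF (chars : List Char) (lk j col : Nat) : Char :=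
  if j + col * lk < chars.length then chars.getD (j + col * lk) ' ' else ' '

-- the row contents A's distribution loop accumulates for residue j after the whole message
def distF (chars : List Char) (lk j : Nat) : List Char :=
  ((List.range chars.length).filter (fun i => i % lk == j)).map (fun i => chars.getD i ' ')

lemma getD_map_range {α : Type} (f : Nat → α) (lk idx : Nat) (h : idx < lk) (d : α) :
    ((List.range lk).map f).getD idx d = f idx := by
  rw [List.getD_eq_getElem _ _ (by simpa using h)]
  simp

lemma set_map_range {α : Type} (f : Nat → α) (lk idx : Nat) (h : idx < lk) (v : α) :
    ((List.range lk).map f).set idx v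
      = (List.range lk).map (fun j => if j = idx then v else f j) := by
  apply List.ext_getElem (by simp)
  intro i h1 h2
  simp only [List.getElem_set, List.getElem_map, List.getElem_range]
  by_cases h3 : idx = i
  · subst h3; simp
  · rw [if_neg h3, if_neg (fun hh => h3 hh.symm)]

lemma pymod_natCast (m n : Nat) : PySem.Int.mod (m : Int) (n : Int) = ((m % n : Nat) : Int) := by
  show Int.fmod _ _ = _
  rw [Int.fmod_eq_emod]
  omega

lemma distF_snoc (cs : List Char) (c : Char) (lk j : Nat) :
    distF (cs ++ [c]) lk j
      = distF cs lk j ++ (if cs.length % lk == j then [c] else []) := by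
  unfold distF
  rw [List.length_append, List.length_singleton, List.range_succ, List.filter_append,
    List.map_append]
  congr 1
  · apply List.map_congr_left
    intro i hi
    have hilt : i < cs.length := List.mem_range.mp (List.mem_of_mem_filter hi)
    exact List.getD_append cs [c] ' ' i hilt
  · by_cases hc : cs.length % lk == j
    · simp only [List.filter_singleton, hc, if_pos]
      simp [List.getD]
    · simp [hc]

lemma dist_eq (chars ks : List Char) (hlk : 0 < ks.length) :
    (PySem.List.enumerate chars 0).foldl (fun m ic =>
        let idx := (PySem.Int.mod ic.1 (ks.length : Int)).toNat
        m.set idx (m.getD idx [] ++ [ic.2])) (ks.map (fun c => [c]))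
      = (List.range ks.length).map (fun j => ks.getD j ' ' :: distF chars ks.length j) := by
  induction chars using List.reverseRecOn with
  | nil =>
    simp only [PySem.List.enumerate_nil, List.foldl_nil]
    apply List.ext_getElem (by simp)
    intro i h1 h2
    have : i < ks.length := by simpa using h2
    simp [distF, List.getD, List.getElem?_eq_getElem this]
  | append_singleton cs c ih =>
    rw [PySem.List.enumerate_append, List.foldl_append, ih]
    have hidx : ((PySem.Int.mod ((0 : Int) + (cs.length : Int)) (ks.length : Int)).toNat)
        = cs.length % ks.length := by
      rw [zero_add, pymod_natCast]; omega
    have hlt : cs.length % ks.length < ks.length := Nat.mod_lt _ hlk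
    simp only [PySem.List.enumerate_cons, PySem.List.enumerate_nil, List.foldl_cons,
      List.foldl_nil, hidx]
    rw [getD_map_range _ _ _ hlt, set_map_range _ _ _ hlt]
    apply List.map_congr_left
    intro j hj
    rw [distF_snoc]
    by_cases hje : j = cs.length % ks.length
    · subst hje
      simp
    · rw [if_neg hje, if_neg (by simpa using Ne.symm hje), List.append_nil]

-- number of message characters that land in the row of key position j
def cnt (n lk j : Nat) : Nat := n / lk + (if j < n % lk then 1 else 0)

lemma filter_range_small (lk j r : Nat) (hr : r ≤ lk) :
    (List.range r).filter (fun i => i % lk == j) = if j < r then [j] else [] := by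
  induction r with
  | zero => simp
  | succ r ih =>
    rw [List.range_succ, List.filter_append, ih (by omega)]
    have hrlk : r % lk = r := Nat.mod_eq_of_lt (by omega)
    by_cases hjr : j < r
    · have : ¬ (r % lk == j) := by simp [hrlk]; omega
      simp [this, hjr, show j < r + 1 by omega]
    · by_cases hje : j = r
      · subst hje
        simp [hrlk]
      · have : ¬ (r % lk == j) := by simp [hrlk]; omega
        simp [this, hjr, show ¬ j < r + 1 by omega]

lemma filter_range_mod_aux (lk j : Nat) (hj : j < lk) (q : Nat) : ∀ r < lk,
    (List.range (q * lk + r)).filter (fun i => i % lk == j)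
      = (List.range (q + if j < r then 1 else 0)).map (fun s => j + s * lk) := by
  induction q with
  | zero =>
    intro r hr
    rw [zero_mul, zero_add, filter_range_small lk j r (by omega)]
    by_cases hjr : j < r <;> simp [hjr]
  | succ q ih =>
    intro r hr
    have hsplit : (q + 1) * lk + r = lk + (q * lk + r) := by ring
    rw [hsplit, List.range_add, List.filter_append, filter_range_small lk j lk le_rfl,
      if_pos hj, List.filter_map]
    have hcomp : (fun i => i % lk == j) ∘ (fun x => lk + x) = (fun i => i % lk == j) := by
      funext i; simp [Nat.add_mod_left]
    rw [hcomp, ih r hr]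
    have : q + 1 + (if j < r then 1 else 0) = (q + (if j < r then 1 else 0)) + 1 := by omega
    rw [this, List.range_succ_eq_map]
    simp only [List.map_cons, List.map_map, List.cons_append, List.nil_append]
    congr 1
    · omega
    · apply List.map_congr_left
      intro s _
      show lk + (j + s * lk) = j + (s + 1) * lk
      ring

lemma filter_range_mod (n lk j : Nat) (hlk : 0 < lk) (hj : j < lk) :
    (List.range n).filter (fun i => i % lk == j)
      = (List.range (cnt n lk j)).map (fun s => j + s * lk) := by
  have h := filter_range_mod_aux lk j hj (n / lk) (n % lk) (Nat.mod_lt _ hlk)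
  have hn : n = n / lk * lk + n % lk := (Nat.div_add_mod' n lk).symm
  unfold cnt
  conv_lhs => rw [hn]
  exact h

lemma cnt_iff_col (n lk j col : Nat) (hlk : 0 < lk) (hj : j < lk) :
    col < cnt n lk j ↔ j + col * lk < n := by
  have hn : n = n / lk * lk + n % lk := (Nat.div_add_mod' n lk).symm
  have hr : n % lk < lk := Nat.mod_lt _ hlk
  unfold cnt
  constructor
  · intro h
    by_cases hjr : j < n % lk
    · rw [if_pos hjr] at h
      have : col * lk ≤ (n / lk) * lk := Nat.mul_le_mul_right lk (by omega)
      omega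
    · rw [if_neg hjr] at h
      have : (col + 1) * lk ≤ (n / lk) * lk := Nat.mul_le_mul_right lk (by omega)
      have h2 : (col + 1) * lk = col * lk + lk := by ring
      omega
  · intro h
    by_contra hcon
    by_cases hjr : j < n % lk
    · rw [if_pos hjr] at hcon
      have : (n / lk + 1) * lk ≤ col * lk := Nat.mul_le_mul_right lk (by omega)
      have h2 : (n / lk + 1) * lk = (n / lk) * lk + lk := by ring
      omega
    · rw [if_neg hjr] at hcon
      have : (n / lk) * lk ≤ col * lk := Nat.mul_le_mul_right lk (by omega)
      omega

lemma cnt_le_cnt_zero (n lk j : Nat) : cnt n lk j ≤ cnt n lk 0 := by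
  unfold cnt
  split_ifs <;> omega

lemma ncols_eq_cnt (n lk : Nat) (hlk : 0 < lk) : (n + lk - 1) / lk = cnt n lk 0 := by
  have hn : n = n / lk * lk + n % lk := (Nat.div_add_mod' n lk).symm
  have hr : n % lk < lk := Nat.mod_lt _ hlk
  unfold cnt
  by_cases h0 : 0 < n % lk
  · have he : n + lk - 1 = (n % lk - 1) + (n / lk + 1) * lk := by
      have : (n / lk + 1) * lk = n / lk * lk + lk := by ring
      omega
    rw [he, Nat.add_mul_div_right _ _ hlk, Nat.div_eq_of_lt (by omega), if_pos h0]
    omega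
  · have he : n + lk - 1 = (lk - 1) + (n / lk) * lk := by omega
    rw [he, Nat.add_mul_div_right _ _ hlk, Nat.div_eq_of_lt (by omega), if_neg h0]
    omega

-- a padded row of the grid, read as a function of the column index
lemma padded_row_eq (chars : List Char) (lk j : Nat) (hlk : 0 < lk) (hj : j < lk) :
    (List.range (cnt chars.length lk j)).map (fun s => chars.getD (j + s * lk) ' ')
        ++ List.replicate (cnt chars.length lk 0 - cnt chars.length lk j) ' '
      = (List.range (cnt chars.length lk 0)).map (cellF chars lk j) := by
  have hle := cnt_le_cnt_zero chars.length lk j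
  apply List.ext_getElem (by simp; omega)
  intro i h1 h2
  simp only [List.length_append, List.length_map, List.length_range, List.length_replicate] at h1
  simp only [List.length_map, List.length_range] at h2
  rw [List.getElem_map, List.getElem_range]
  unfold cellF
  by_cases hi : i < cnt chars.length lk j
  · rw [List.getElem_append_left (by simpa using hi), List.getElem_map, List.getElem_range,
      if_pos ((cnt_iff_col chars.length lk j i hlk hj).mp hi)]
  · rw [List.getElem_append_right (by simpa using hi), List.getElem_replicate,
      if_neg (fun hcon => hi ((cnt_iff_col chars.length lk j i hlk hj).mpr hcon))]

lemma insertBy_map {α β κ : Type} [LT κ] [DecidableLT κ] (f : α → β) (key : β → κ)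
    (x : α) (l : List α) :
    PySem.List.insertBy (fun a b => decide (key a < key b)) (f x) (l.map f)
      = (PySem.List.insertBy (fun a b => decide (key (f a) < key (f b))) x l).map f := by
  induction l with
  | nil => rfl
  | cons y ys ih =>
    simp only [List.map_cons, PySem.List.insertBy]
    by_cases h : key (f x) < key (f y)
    · simp [h]
    · simp only [h, decide_false]
      rw [if_neg (by simp), if_neg (by simp), List.map_cons, ih]

lemma sorted_map_nat {α κ : Type} [LT κ] [DecidableLT κ] (f : Nat → α) (key : α → κ)
    (l : List Nat) :
    PySem.List.sorted (l.map f) key false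
      = (PySem.List.sorted l (fun a => key (f a)) false).map f := by
  rw [PySem.List.sorted_eq_foldl_insertBy, PySem.List.sorted_eq_foldl_insertBy, List.foldl_map]
  suffices h : ∀ acc : List Nat,
      List.foldl (fun acc x => PySem.List.insertBy (fun a b => decide (key a < key b)) (f x) acc)
        (acc.map f) l
      = (List.foldl (fun acc x =>
          PySem.List.insertBy (fun a b => decide (key (f a) < key (f b))) x acc) acc l).map f by
    simpa using h []
  induction l with
  | nil => intro acc; rfl
  | cons y ys ih =>
    intro acc
    simp only [List.foldl_cons]
    rw [insertBy_map, ih]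

lemma foldl_min_const (L : Nat) (ls : List (List Char)) (h : ∀ l ∈ ls, l.length = L) :
    ls.foldl (fun a l => min a l.length) L = L := by
  induction ls with
  | nil => rfl
  | cons y ys ih =>
    simp only [List.foldl_cons, h y (by simp), min_self]
    exact ih (fun l hl => h l (by simp [hl]))

lemma pyZipStar_rect (g : Nat → Nat → Char) (L : Nat) (o : Nat) (os : List Nat) :
    pyZipStar ((o :: os).map (fun j => (List.range L).map (g j)))
      = (List.range L).map (fun i => (o :: os).map (fun j => g j i)) := by
  show (List.range ((os.map _).foldl _ _)).map _ = _
  rw [show ((List.range L).map (g o)).length = L by simp]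
  rw [foldl_min_const L _ (by intro l hl; simp at hl; obtain ⟨j, _, rfl⟩ := hl; simp)]
  apply List.map_congr_left
  intro i hi
  simp only [List.map_cons, List.map_map]
  rw [getD_map_range _ _ _ (List.mem_range.mp hi)]
  congr 1
  apply List.map_congr_left
  intro j _
  show ((List.range L).map (g j)).getD i ' ' = g j i
  exact getD_map_range _ _ _ (List.mem_range.mp hi) _

lemma distF_eq (chars : List Char) (lk j : Nat) (hlk : 0 < lk) (hj : j < lk) :
    distF chars lk j
      = (List.range (cnt chars.length lk j)).map (fun s => chars.getD (j + s * lk) ' ') := by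
  unfold distF
  rw [filter_range_mod _ _ _ hlk hj, List.map_map]
  rfl

theorem nico_cipher_spec : Claim_equal_nico_cipher := by
  intro msg k _hdom hpre
  have hklist : k.toList ≠ [] := fun hl => hpre (String.toList_eq_nil_iff.mp hl)
  have hlk : 0 < k.toList.length := List.length_pos_iff.mpr hklist
  unfold Spec_nico_cipher
  simp only [nico_cipher, nico_cipher_alt]
  rw [dist_eq msg.toList k.toList hlk,
    getD_map_range (fun j => k.toList.getD j ' ' :: distF msg.toList k.toList.length j)
      _ 0 hlk, List.map_map]
  rw [distF_eq msg.toList k.toList.length 0 hlk hlk]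
  have hm2 : (List.range k.toList.length).map
      ((fun row => row ++ List.replicate
          ((k.toList.getD 0 ' ' :: (List.range (cnt msg.toList.length k.toList.length 0)).map
            (fun s => msg.toList.getD (0 + s * k.toList.length) ' ')).length - row.length) ' ')
        ∘ (fun j => k.toList.getD j ' ' :: distF msg.toList k.toList.length j))
      = (List.range k.toList.length).map
        (fun j => k.toList.getD j ' '
          :: (List.range (cnt msg.toList.length k.toList.length 0)).map
              (cellF msg.toList k.toList.length j)) := by
    apply List.map_congr_left
    intro j hj
    have hjlt := List.mem_range.mp hj
    show (k.toList.getD j ' ' :: distF msg.toList k.toList.length j) ++ _ = _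
    rw [distF_eq msg.toList k.toList.length j hlk hjlt, List.cons_append]
    have hdl : (distF msg.toList k.toList.length j).length
        = cnt msg.toList.length k.toList.length j := by
      rw [distF_eq msg.toList k.toList.length j hlk hjlt]; simp
    simp only [List.length_cons, List.length_map, List.length_range, hdl]
    rw [show cnt msg.toList.length k.toList.length 0 + 1 - (cnt msg.toList.length k.toList.length j + 1)
        = cnt msg.toList.length k.toList.length 0 - cnt msg.toList.length k.toList.length j by omega]
    rw [padded_row_eq msg.toList k.toList.length j hlk hjlt]
  rw [hm2, sorted_map_nat, List.map_map]
  simp only [Function.comp_def, List.getD_cons_zero, List.drop_succ_cons, List.drop_zero]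
  have hne : PySem.List.sorted (List.range k.toList.length)
      (fun j => k.toList.getD j ' ') false ≠ [] := by
    intro h
    have h2 := (PySem.List.sorted_eq_nil_iff (List.range k.toList.length)
      (fun j => k.toList.getD j ' ') false).mp h
    rw [List.range_eq_nil] at h2
    omega
  obtain ⟨o, os, ho⟩ := List.exists_cons_of_ne_nil hne
  rw [ho, pyZipStar_rect, ncols_eq_cnt msg.toList.length k.toList.length hlk]
  simp only [PySem.List.foldl_append_singleton_eq_map]
  rw [PySem.List.foldl_append_eq_flatMap, List.nil_append, ← List.flatMap_def]
  unfold cellF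
  rfl
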